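-- pv_equiv track=rewrite | github.com/sergekostenchuk/Auto-iFlow-3.1.1-code | apps/backend/spec/pipeline/preflight_scoper.py | _apply_smart_cap
-- ===== SOURCE A (Python) =====
-- def _apply_priority_filter(tests: list[str], max_count: int) -> list[str]:
--     priorities = [
--         "PYTEST_SECURITY",
--         "PYTEST_PIPELINE",
--         "PYTEST_PROOF_GATE",
--         "NPM_TEST",
--         "PYTEST_COLLECT",
--     ]
--     rank = {alias: index for index, alias in enumerate(priorities)}
--     indexed = list(enumerate(tests))
--     indexed.sort(key=lambda item: (rank.get(item[1], len(rank)), item[0]))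
--     return [alias for _, alias in indexed[:max_count]]
--
-- def _apply_smart_cap(tests: list[str], files_to_modify: list[str], max_count: int) -> list[str]:
--     if max_count <= 0 or len(tests) <= max_count:
--         return tests
--     if not files_to_modify:
--         return _apply_priority_filter(tests, max_count)
--
--     direct = []
--     for alias in tests:
--         if alias in ("PYTEST_SECURITY", "PYTEST_PROOF_GATE", "PYTEST_PIPELINE"):
--             direct.append(alias)
--
--     direct_set = set(direct)
--     indirect = [alias for alias in tests if alias not in direct_set]
--
--     remaining = max(0, max_count - len(direct))
--     if remaining > 0 and indirect:
--         indirect = _apply_priority_filter(indirect, remaining)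
--     else:
--         indirect = []
--
--     return direct + indirect
-- ===== SOURCE B (Python) =====
-- _PRIORITIES = [
--     "PYTEST_SECURITY",
--     "PYTEST_PIPELINE",
--     "PYTEST_PROOF_GATE",
--     "NPM_TEST",
--     "PYTEST_COLLECT",
-- ]
--
-- _IMPORTANT = {"PYTEST_SECURITY", "PYTEST_PROOF_GATE", "PYTEST_PIPELINE"}
--
--
-- def _bucket_cap(tests: list[str], max_count: int) -> list[str]:
--     rank = {alias: index for index, alias in enumerate(_PRIORITIES)}
--     buckets = [[] for _ in range(len(_PRIORITIES) + 1)]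
--     for alias in tests:
--         buckets[rank.get(alias, len(_PRIORITIES))].append(alias)
--     out = []
--     for bucket in buckets:
--         out.extend(bucket)
--     return out[:max_count]
--
--
-- def _apply_smart_cap(tests: list[str], files_to_modify: list[str], max_count: int) -> list[str]:
--     if max_count <= 0 or len(tests) <= max_count:
--         return tests
--     if not files_to_modify:
--         return _bucket_cap(tests, max_count)
--     direct = [alias for alias in tests if alias in _IMPORTANT]
--     if len(direct) >= max_count:
--         return direct
--     indirect = [alias for alias in tests if alias not in _IMPORTANT]
--     return direct + _bucket_cap(indirect, max_count - len(direct))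
-- ===== Notes on version B (the rewrite author's own statement) =====
-- stated objective: alternative
-- what changed: The priority filter's stable comparison sort over (rank, index) tuples is replaced by a single bucketing pass (one bucket per priority rank, concatenated in rank order, then capped), and the direct/remaining max(0,...) bookkeeping is replaced by comprehensions with an early return when the important tests already fill the cap.
import Mathlib
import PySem

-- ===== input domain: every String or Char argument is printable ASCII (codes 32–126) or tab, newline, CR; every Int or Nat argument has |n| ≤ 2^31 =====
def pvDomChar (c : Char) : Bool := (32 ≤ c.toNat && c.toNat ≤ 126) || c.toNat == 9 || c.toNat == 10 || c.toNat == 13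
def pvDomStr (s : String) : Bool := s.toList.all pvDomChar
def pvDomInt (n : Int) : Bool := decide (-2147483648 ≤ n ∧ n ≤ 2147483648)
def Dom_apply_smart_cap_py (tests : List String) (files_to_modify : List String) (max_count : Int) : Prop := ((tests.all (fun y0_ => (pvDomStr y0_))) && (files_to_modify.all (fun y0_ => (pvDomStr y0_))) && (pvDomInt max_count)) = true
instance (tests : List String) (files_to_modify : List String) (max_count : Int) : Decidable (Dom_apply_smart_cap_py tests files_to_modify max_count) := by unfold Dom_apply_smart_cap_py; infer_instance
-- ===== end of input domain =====

-- B replaces A's comparison sort in the priority filter by a single bucketing pass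
-- (one bucket per priority rank, concatenated in rank order) and replaces the
-- direct/remaining bookkeeping by an early return; same return value (alternative
-- decomposition, no speed claim).

-- ===== PORT A =====
def pvAprioritiesA : List String :=
  ["PYTEST_SECURITY", "PYTEST_PIPELINE", "PYTEST_PROOF_GATE", "NPM_TEST", "PYTEST_COLLECT"]

def apply_priority_filter (tests : List String) (max_count : Int) : List String :=
  let priorities := pvAprioritiesA
  let rank : PySem.Dict String Int :=
    (PySem.List.enumerate priorities 0).foldl (fun d p => d.insert p.2 p.1) PySem.Dict.empty
  let indexed := PySem.List.enumerate tests 0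
  let sortedIndexed :=
    PySem.List.sorted2 indexed
      (fun item => rank.getD item.2 ((PySem.Dict.size rank : Nat) : Int))
      (fun item => item.1)
  (PySem.List.slice sortedIndexed none (some max_count)).map (fun p => p.2)

def apply_smart_cap_py (tests : List String) (files_to_modify : List String) (max_count : Int) : List String :=
  if max_count ≤ 0 ∨ (tests.length : Int) ≤ max_count then tests
  else if files_to_modify = [] then apply_priority_filter tests max_count
  else
    let direct := tests.foldl (fun acc al =>
      if al = "PYTEST_SECURITY" ∨ al = "PYTEST_PROOF_GATE" ∨ al = "PYTEST_PIPELINE"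
      then acc ++ [al] else acc) []
    let direct_set := PySem.Set.ofList direct
    let indirect := tests.filter (fun al => decide (¬ al ∈ direct_set))
    let remaining := max 0 (max_count - (direct.length : Int))
    let indirect2 :=
      if remaining > 0 ∧ indirect ≠ [] then apply_priority_filter indirect remaining else []
    direct ++ indirect2

-- ===== PORT B =====
def pvBpriorities : List String :=
  ["PYTEST_SECURITY", "PYTEST_PIPELINE", "PYTEST_PROOF_GATE", "NPM_TEST", "PYTEST_COLLECT"]

def pvBimportant : PySem.Set String :=
  PySem.Set.ofList ["PYTEST_SECURITY", "PYTEST_PROOF_GATE", "PYTEST_PIPELINE"]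

def bucket_cap (tests : List String) (max_count : Int) : List String :=
  let rank : PySem.Dict String Int :=
    (PySem.List.enumerate pvBpriorities 0).foldl (fun d p => d.insert p.2 p.1) PySem.Dict.empty
  let buckets0 : List (List String) := List.replicate (pvBpriorities.length + 1) []
  let buckets := tests.foldl (fun bs al =>
    PySem.List.pySetD bs (rank.getD al ((pvBpriorities.length : Nat) : Int))
      (PySem.List.pyGetD bs (rank.getD al ((pvBpriorities.length : Nat) : Int)) [] ++ [al])) buckets0
  let out := buckets.foldl (fun acc b => acc ++ b) []
  PySem.List.slice out none (some max_count)

def apply_smart_cap_py_alt (tests : List String) (files_to_modify : List String) (max_count : Int) : List String :=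
  if max_count ≤ 0 ∨ (tests.length : Int) ≤ max_count then tests
  else if files_to_modify = [] then bucket_cap tests max_count
  else
    let direct := tests.filter (fun al => decide (al ∈ pvBimportant))
    if (direct.length : Int) ≥ max_count then direct
    else
      let indirect := tests.filter (fun al => decide (¬ al ∈ pvBimportant))
      direct ++ bucket_cap indirect (max_count - (direct.length : Int))

-- ===== PRECONDITION & SPEC =====
def Spec_apply_smart_cap_py (tests : List String) (files_to_modify : List String) (max_count : Int) (out : List String) : Prop := out = apply_smart_cap_py_alt tests files_to_modify max_count
instance (tests : List String) (files_to_modify : List String) (max_count : Int) (out : List String) : Decidable (Spec_apply_smart_cap_py tests files_to_modify max_count out) := by unfold Spec_apply_smart_cap_py; infer_instance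

-- ===== CLAIM (what is proved, stated in full; the proofs are below) =====
def Claim_equal_apply_smart_cap_py : Prop := ∀ (tests : List String) (files_to_modify : List String) (max_count : Int), Dom_apply_smart_cap_py tests files_to_modify max_count → Spec_apply_smart_cap_py tests files_to_modify max_count (apply_smart_cap_py tests files_to_modify max_count)

-- ===== LEMMAS AND PROOFS =====

-- closed form of the rank lookup both ports perform
def pvRankOf (a : String) : Int :=
  if a = "PYTEST_SECURITY" then 0 else if a = "PYTEST_PIPELINE" then 1
  else if a = "PYTEST_PROOF_GATE" then 2 else if a = "NPM_TEST" then 3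
  else if a = "PYTEST_COLLECT" then 4 else 5

def pvRankD : PySem.Dict String Int :=
  (PySem.List.enumerate pvAprioritiesA 0).foldl (fun d p => d.insert p.2 p.1) PySem.Dict.empty

lemma pvRankD_getD (a : String) : pvRankD.getD a 5 = pvRankOf a := by
  unfold pvRankD pvAprioritiesA pvRankOf
  simp only [PySem.List.enumerate_cons, PySem.List.enumerate_nil, List.foldl_cons,
    List.foldl_nil, PySem.Dict.getD_insert]
  norm_num
  by_cases h1 : a = "PYTEST_SECURITY" <;> by_cases h2 : a = "PYTEST_PIPELINE" <;>
    by_cases h3 : a = "PYTEST_PROOF_GATE" <;> by_cases h4 : a = "NPM_TEST" <;>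
    by_cases h5 : a = "PYTEST_COLLECT" <;>
    simp_all

lemma pvRankOf_cases (a : String) :
    pvRankOf a = 0 ∨ pvRankOf a = 1 ∨ pvRankOf a = 2 ∨ pvRankOf a = 3 ∨
      pvRankOf a = 4 ∨ pvRankOf a = 5 := by
  unfold pvRankOf; split_ifs <;> simp

-- string-side buckets: the common shape both sides are reduced to
def pvF (r : Int) (l : List String) : List String := l.filter (fun a => decide (pvRankOf a = r))

def pvCap (l : List String) (mc : Int) : List String :=
  PySem.List.slice (pvF 0 l ++ pvF 1 l ++ pvF 2 l ++ pvF 3 l ++ pvF 4 l ++ pvF 5 l)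
    none (some mc)

-- pair-side buckets (for A's indexed sort)
def pvFp (r : Int) (l : List (Int × String)) : List (Int × String) :=
  l.filter (fun p => decide (pvRankOf p.2 = r))

-- the scalar key the tuple comparison in sorted2 amounts to, on enumerate-indexed pairs
def pvK (L : Int) (p : Int × String) : Int := pvRankOf p.2 * L + p.1

lemma pvLex_iff (r1 i1 r2 i2 L : Int) (hi1 : 0 ≤ i1) (h1 : i1 < L) (hi2 : 0 ≤ i2)
    (h2 : i2 < L) : r1 * L + i1 < r2 * L + i2 ↔ (r1 < r2 ∨ (r1 = r2 ∧ i1 < i2)) := by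
  constructor
  · intro h
    rcases lt_trichotomy r1 r2 with hlt | heq | hgt
    · exact Or.inl hlt
    · subst heq; right; exact ⟨rfl, by omega⟩
    · exfalso
      nlinarith [mul_le_mul_of_nonneg_right (by omega : r2 + 1 ≤ r1) (by omega : (0:Int) ≤ L)]
  · rintro (hlt | ⟨heq, hlt⟩)
    · nlinarith [mul_le_mul_of_nonneg_right (by omega : r1 + 1 ≤ r2) (by omega : (0:Int) ≤ L)]
    · subst heq; omega

lemma pvInsertBy_congr {f g : (Int × String) → (Int × String) → Bool} (x : Int × String)
    (ys : List (Int × String)) (h : ∀ y ∈ ys, f x y = g x y) :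
    PySem.List.insertBy f x ys = PySem.List.insertBy g x ys := by
  induction ys with
  | nil => simp [PySem.List.insertBy]
  | cons y ys ih =>
    have hy : f x y = g x y := h y (by simp)
    simp only [PySem.List.insertBy, hy]
    split
    · rfl
    · exact congrArg _ (ih (fun z hz => h z (by simp [hz])))

lemma pvFoldl_insertBy_congr {f g : (Int × String) → (Int × String) → Bool}
    (S : List (Int × String)) :
    ∀ (xs acc : List (Int × String)), (∀ a ∈ S, ∀ b ∈ S, f a b = g a b) →
      (∀ x ∈ xs, x ∈ S) → (∀ x ∈ acc, x ∈ S) →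
      xs.foldl (fun acc x => PySem.List.insertBy f x acc) acc
        = xs.foldl (fun acc x => PySem.List.insertBy g x acc) acc := by
  intro xs
  induction xs with
  | nil => intro acc _ _ _; rfl
  | cons x xs ih =>
    intro acc hfg hxs hacc
    have hxS : x ∈ S := hxs x (by simp)
    simp only [List.foldl_cons]
    rw [pvInsertBy_congr x acc (fun y hy => hfg x hxS y (hacc y hy))]
    exact ih _ hfg (fun z hz => hxs z (by simp [hz]))
      (fun z hz => ((PySem.List.mem_insertBy _ _ _ _).1 hz).elim
        (fun he => he ▸ hxS) (fun hm => hacc z hm))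

lemma pvMem_enumerate_bounds {tests : List String} {p : Int × String}
    (hp : p ∈ PySem.List.enumerate tests 0) : 0 ≤ p.1 ∧ p.1 < (tests.length : Int) := by
  rcases (PySem.List.mem_enumerate_iff tests 0 p).1 hp with ⟨k, hk, rfl⟩
  constructor <;> simp <;> omega

-- sorted2 with the tuple key equals sorted with the scalar key pvK on the enumerated list
lemma pvSorted2_eq_sorted (tests : List String) :
    PySem.List.sorted2 (PySem.List.enumerate tests 0)
      (fun p => pvRankOf p.2) (fun p => p.1) false
    = PySem.List.sorted (PySem.List.enumerate tests 0) (pvK (tests.length : Int)) false := by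
  simp only [PySem.List.sorted2, PySem.List.sorted, if_neg (by decide : ¬ (false = true))]
  apply pvFoldl_insertBy_congr (PySem.List.enumerate tests 0)
  · intro a ha b hb
    have hA := pvMem_enumerate_bounds ha
    have hB := pvMem_enumerate_bounds hb
    have hiff := pvLex_iff (pvRankOf a.2) a.1 (pvRankOf b.2) b.1 (tests.length : Int)
      hA.1 hA.2 hB.1 hB.2
    by_cases h1 : pvRankOf a.2 < pvRankOf b.2 <;> by_cases h2 : pvRankOf b.2 < pvRankOf a.2 <;>
      by_cases h3 : a.1 < b.1 <;> simp [pvK, h1, h2, h3, hiff] <;> omega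
  · exact fun x hx => hx
  · intro x hx; simp at hx

lemma pvPartition_perm {α : Type} [DecidableEq α] (rk : α → Int)
    (h : ∀ a, rk a = 0 ∨ rk a = 1 ∨ rk a = 2 ∨ rk a = 3 ∨ rk a = 4 ∨ rk a = 5)
    (l : List α) :
    (l.filter (fun a => decide (rk a = 0)) ++ l.filter (fun a => decide (rk a = 1))
      ++ l.filter (fun a => decide (rk a = 2)) ++ l.filter (fun a => decide (rk a = 3))
      ++ l.filter (fun a => decide (rk a = 4)) ++ l.filter (fun a => decide (rk a = 5))).Perm l := by
  rw [List.perm_iff_count]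
  intro x
  have key : ∀ r : Int, List.count x (l.filter (fun a => decide (rk a = r)))
      = if rk x = r then List.count x l else 0 := by
    intro r
    by_cases hr : rk x = r
    · rw [List.count_filter (by simp [hr])]; simp [hr]
    · rw [if_neg hr]
      refine List.count_eq_zero.2 ?_
      intro hmem
      exact hr (by simpa using (List.mem_filter.1 hmem).2)
  simp only [List.count_append, key]
  rcases h x with h' | h' | h' | h' | h' | h' <;> rw [h'] <;> norm_num

lemma pvFp_map_snd (r : Int) (tests : List String) :
    (pvFp r (PySem.List.enumerate tests 0)).map (fun p => p.2) = pvF r tests := by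
  unfold pvFp pvF
  generalize (0 : Int) = s
  induction tests generalizing s with
  | nil => simp [PySem.List.enumerate_nil]
  | cons a l ih =>
    rw [PySem.List.enumerate_cons]
    by_cases h : pvRankOf a = r <;> simp [h, ih]

lemma pvSorted_eq_partition (tests : List String) :
    PySem.List.sorted (PySem.List.enumerate tests 0) (pvK (tests.length : Int)) false
    = pvFp 0 (PySem.List.enumerate tests 0) ++ pvFp 1 (PySem.List.enumerate tests 0)
      ++ pvFp 2 (PySem.List.enumerate tests 0) ++ pvFp 3 (PySem.List.enumerate tests 0)
      ++ pvFp 4 (PySem.List.enumerate tests 0) ++ pvFp 5 (PySem.List.enumerate tests 0) := by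
  apply PySem.List.sorted_eq_of_perm_of_pairwise_lt
  · exact pvPartition_perm (fun p : Int × String => pvRankOf p.2) (fun p => pvRankOf_cases p.2) _
  · -- pairwise strict pvK order on the partition
    have hpart : ∀ r : Int, (pvFp r (PySem.List.enumerate tests 0)).Pairwise
        (fun p q => pvK (tests.length : Int) p < pvK (tests.length : Int) q) := by
      intro r
      have h1 : (pvFp r (PySem.List.enumerate tests 0)).Pairwise
          (fun p q : Int × String => p.1 < q.1) :=
        List.Pairwise.filter _ (PySem.List.pairwise_lt_enumerate tests 0)
      refine h1.imp_of_mem ?_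
      intro p q hp hq hlt
      have hpr : pvRankOf p.2 = r := (by simpa [pvFp] using hp :
        p ∈ PySem.List.enumerate tests 0 ∧ pvRankOf p.2 = r).2
      have hqr : pvRankOf q.2 = r := (by simpa [pvFp] using hq :
        q ∈ PySem.List.enumerate tests 0 ∧ pvRankOf q.2 = r).2
      simp only [pvK, hpr, hqr]
      omega
    have hcross : ∀ (r r' : Int), r < r' → ∀ p, p ∈ pvFp r (PySem.List.enumerate tests 0) →
        ∀ q, q ∈ pvFp r' (PySem.List.enumerate tests 0) →
        pvK (tests.length : Int) p < pvK (tests.length : Int) q := by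
      intro r r' hrr p hp q hq
      have hpm : p ∈ PySem.List.enumerate tests 0 ∧ pvRankOf p.2 = r := by
        simpa [pvFp] using hp
      have hqm : q ∈ PySem.List.enumerate tests 0 ∧ pvRankOf q.2 = r' := by
        simpa [pvFp] using hq
      have hB1 := pvMem_enumerate_bounds hpm.1
      have hB2 := pvMem_enumerate_bounds hqm.1
      have := (pvLex_iff (pvRankOf p.2) p.1 (pvRankOf q.2) q.1 (tests.length : Int)
        hB1.1 hB1.2 hB2.1 hB2.2).2 (Or.inl (by omega))
      simpa [pvK, hpm.2, hqm.2] using this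
    simp only [List.pairwise_append, List.mem_append]
    and_intros
    all_goals try exact hpart _
    all_goals intro p hp q hq
    all_goals try rcases hp with hp | hp
    all_goals try rcases hp with hp | hp
    all_goals try rcases hp with hp | hp
    all_goals try rcases hp with hp | hp
    all_goals exact hcross _ _ (by norm_num) p hp q hq

lemma pvPriority_eq_cap (tests : List String) (mc : Int) (hmc : 0 < mc) :
    apply_priority_filter tests mc = pvCap tests mc := by
  simp only [apply_priority_filter]
  have hrank : (PySem.List.enumerate pvAprioritiesA 0).foldl
      (fun d p => d.insert p.2 p.1) PySem.Dict.empty = pvRankD := rfl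
  rw [hrank]
  have hsize : ((PySem.Dict.size pvRankD : Nat) : Int) = 5 := by decide
  rw [hsize]
  have hkey : (fun item : Int × String => pvRankD.getD item.2 5)
      = (fun item : Int × String => pvRankOf item.2) :=
    funext fun item => pvRankD_getD item.2
  rw [hkey, pvSorted2_eq_sorted, pvSorted_eq_partition, pvCap,
    PySem.List.slice_to _ (le_of_lt hmc), PySem.List.slice_to _ (le_of_lt hmc),
    List.map_take]
  simp only [List.map_append, pvFp_map_snd]

-- the bucket-appending step of B's port, with the rank lookup in closed form
def pvStep (bs : List (List String)) (al : String) : List (List String) :=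
  PySem.List.pySetD bs (pvRankOf al) (PySem.List.pyGetD bs (pvRankOf al) [] ++ [al])

lemma pvBucket_fold (l : List String) :
    ∀ b0 b1 b2 b3 b4 b5 : List String,
    l.foldl pvStep [b0, b1, b2, b3, b4, b5]
    = [b0 ++ pvF 0 l, b1 ++ pvF 1 l, b2 ++ pvF 2 l, b3 ++ pvF 3 l,
        b4 ++ pvF 4 l, b5 ++ pvF 5 l] := by
  induction l with
  | nil => intro b0 b1 b2 b3 b4 b5; simp [pvF]
  | cons a l ih =>
    intro b0 b1 b2 b3 b4 b5
    simp only [List.foldl_cons]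
    rcases pvRankOf_cases a with h | h | h | h | h | h
    · have hstep : pvStep [b0, b1, b2, b3, b4, b5] a = [b0 ++ [a], b1, b2, b3, b4, b5] := by
        simp only [pvStep, h]
        simp [PySem.List.pySetD, PySem.List.pySet?, PySem.List.pyGetD,
          PySem.List.pyGet?, PySem.List.pyIdx?]
      rw [hstep, ih]
      simp [pvF, h, List.append_assoc]
    · have hstep : pvStep [b0, b1, b2, b3, b4, b5] a = [b0, b1 ++ [a], b2, b3, b4, b5] := by
        simp only [pvStep, h]
        simp [PySem.List.pySetD, PySem.List.pySet?, PySem.List.pyGetD,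
          PySem.List.pyGet?, PySem.List.pyIdx?]
      rw [hstep, ih]
      simp [pvF, h, List.append_assoc]
    · have hstep : pvStep [b0, b1, b2, b3, b4, b5] a = [b0, b1, b2 ++ [a], b3, b4, b5] := by
        simp only [pvStep, h]
        simp [PySem.List.pySetD, PySem.List.pySet?, PySem.List.pyGetD,
          PySem.List.pyGet?, PySem.List.pyIdx?]
      rw [hstep, ih]
      simp [pvF, h, List.append_assoc]
    · have hstep : pvStep [b0, b1, b2, b3, b4, b5] a = [b0, b1, b2, b3 ++ [a], b4, b5] := by
        simp only [pvStep, h]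
        simp [PySem.List.pySetD, PySem.List.pySet?, PySem.List.pyGetD,
          PySem.List.pyGet?, PySem.List.pyIdx?]
      rw [hstep, ih]
      simp [pvF, h, List.append_assoc]
    · have hstep : pvStep [b0, b1, b2, b3, b4, b5] a = [b0, b1, b2, b3, b4 ++ [a], b5] := by
        simp only [pvStep, h]
        simp [PySem.List.pySetD, PySem.List.pySet?, PySem.List.pyGetD,
          PySem.List.pyGet?, PySem.List.pyIdx?]
      rw [hstep, ih]
      simp [pvF, h, List.append_assoc]
    · have hstep : pvStep [b0, b1, b2, b3, b4, b5] a = [b0, b1, b2, b3, b4, b5 ++ [a]] := by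
        simp only [pvStep, h]
        simp [PySem.List.pySetD, PySem.List.pySet?, PySem.List.pyGetD,
          PySem.List.pyGet?, PySem.List.pyIdx?]
      rw [hstep, ih]
      simp [pvF, h, List.append_assoc]

lemma pvBucket_eq_cap (tests : List String) (mc : Int) :
    bucket_cap tests mc = pvCap tests mc := by
  simp only [bucket_cap]
  have hrank : (PySem.List.enumerate pvBpriorities 0).foldl
      (fun d p => d.insert p.2 p.1) PySem.Dict.empty = pvRankD := rfl
  have hlen : ((pvBpriorities.length : Nat) : Int) = 5 := by decide
  rw [hrank, hlen]
  have hkey : (fun bs al => PySem.List.pySetD bs (pvRankD.getD al 5)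
        (PySem.List.pyGetD bs (pvRankD.getD al 5) [] ++ [al]))
      = pvStep := by
    funext bs al
    rw [pvStep, pvRankD_getD]
  have hrep : List.replicate (pvBpriorities.length + 1) ([] : List String)
      = [[], [], [], [], [], []] := rfl
  rw [hkey, hrep, pvBucket_fold]
  simp only [List.foldl_cons, List.foldl_nil, List.nil_append, pvCap, List.append_assoc]

lemma pvCap_nil (mc : Int) : pvCap [] mc = [] := by
  simp [pvCap, pvF, PySem.List.slice]

lemma pvPred_iff (al : String) :
    (al = "PYTEST_SECURITY" ∨ al = "PYTEST_PROOF_GATE" ∨ al = "PYTEST_PIPELINE")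
      ↔ al ∈ pvBimportant := by
  simp [pvBimportant, PySem.Set.mem_ofList]

-- ===== VERDICT (by name: the statement is the Claim_ definition above) =====
theorem apply_smart_cap_py_spec : Claim_equal_apply_smart_cap_py := by
  intro tests ftm mc _
  unfold Spec_apply_smart_cap_py
  simp only [apply_smart_cap_py, apply_smart_cap_py_alt]
  by_cases h1 : mc ≤ 0 ∨ (tests.length : Int) ≤ mc
  · rw [if_pos h1, if_pos h1]
  · rw [if_neg h1, if_neg h1]
    have hmc : 0 < mc := by omega
    by_cases h2 : ftm = []
    · rw [if_pos h2, if_pos h2, pvPriority_eq_cap tests mc hmc, pvBucket_eq_cap]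
    · rw [if_neg h2, if_neg h2]
      have hfold : tests.foldl (fun acc al =>
          if al = "PYTEST_SECURITY" ∨ al = "PYTEST_PROOF_GATE" ∨ al = "PYTEST_PIPELINE"
          then acc ++ [al] else acc) []
          = tests.filter (fun al => decide (al ∈ pvBimportant)) := by
        have hfun : (fun (acc : List String) al =>
            if al = "PYTEST_SECURITY" ∨ al = "PYTEST_PROOF_GATE" ∨ al = "PYTEST_PIPELINE"
            then acc ++ [al] else acc)
            = (fun (acc : List String) al =>
              if (fun x => decide (x ∈ pvBimportant)) al = true then acc ++ [id al] else acc) := by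
          funext acc al
          by_cases hmem : al ∈ pvBimportant
          · rw [if_pos ((pvPred_iff al).2 hmem)]; simp [hmem]
          · rw [if_neg (fun hc => hmem ((pvPred_iff al).1 hc))]; simp [hmem]
        rw [hfun, PySem.List.foldl_append_if]
        simp
      rw [hfold]
      set direct := tests.filter (fun al => decide (al ∈ pvBimportant)) with hdir
      have hind : tests.filter (fun al => decide (¬ al ∈ PySem.Set.ofList direct))
          = tests.filter (fun al => decide (¬ al ∈ pvBimportant)) := by
        refine List.filter_congr ?_
        intro x hx
        simp [PySem.Set.mem_ofList, hdir, List.mem_filter, hx]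
      rw [hind]
      set indirect := tests.filter (fun al => decide (¬ al ∈ pvBimportant)) with hindir
      by_cases hd : (direct.length : Int) ≥ mc
      · rw [if_pos hd]
        have hmax : max 0 (mc - (direct.length : Int)) = 0 := by omega
        rw [hmax]
        have hno : ¬ ((0 : Int) > 0 ∧ indirect ≠ []) := by simp
        rw [if_neg hno, List.append_nil]
      · rw [if_neg hd]
        have hmax : max 0 (mc - (direct.length : Int)) = mc - (direct.length : Int) := by
          omega
        rw [hmax]
        by_cases hi : indirect = []
        · have hno : ¬ (mc - (direct.length : Int) > 0 ∧ indirect ≠ []) := by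
            simp [hi]
          rw [if_neg hno, hi, pvBucket_eq_cap, pvCap_nil, List.append_nil]
        · have hyes : mc - (direct.length : Int) > 0 ∧ indirect ≠ [] := ⟨by omega, hi⟩
          rw [if_pos hyes,
            pvPriority_eq_cap indirect (mc - (direct.length : Int)) (by omega),
            pvBucket_eq_cap]
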